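-- pv_equiv track=rewrite | github.com/ohtomi/aws-vapor | aws_vapor/utils.py | _replace_params
-- ===== SOURCE A (Python) =====
-- def _replace_params(line, params):
--     for k, v in list(params.items()):
--         key = '{{ %s }}' % k
--         if line.find(key) != -1:
--             pos = line.index(key)
--             l_line = line[:pos]
--             r_line = line[pos + len(key):]
--             return _replace_params(l_line, params) + [v] + _replace_params(r_line, params)
--     return [line]
-- ===== SOURCE B (Python) =====
-- def _replace_params(line, params):
--     # One left-to-right pass per key over a flat token list (iterative),
--     # instead of re-scanning every key recursively per segment.
--     tokens = [(True, line)]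
--     for k, v in params.items():
--         key = '{{ %s }}' % k
--         next_tokens = []
--         for is_literal, text in tokens:
--             if is_literal:
--                 while True:
--                     pos = text.find(key)
--                     if pos == -1:
--                         next_tokens.append((True, text))
--                         break
--                     next_tokens.append((True, text[:pos]))
--                     next_tokens.append((False, v))
--                     text = text[pos + len(key):]
--             else:
--                 next_tokens.append((False, text))
--         tokens = next_tokens
--     return [text for _, text in tokens]
-- ===== Notes on version B (the rewrite author's own statement) =====
-- stated objective: alternative
-- what changed: A's per-segment recursion that rescans the whole key list for every produced fragment is replaced by one iterative fold over the keys that maintains a flat literal/value token list, scanning each literal left to right with find.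
import Mathlib
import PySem

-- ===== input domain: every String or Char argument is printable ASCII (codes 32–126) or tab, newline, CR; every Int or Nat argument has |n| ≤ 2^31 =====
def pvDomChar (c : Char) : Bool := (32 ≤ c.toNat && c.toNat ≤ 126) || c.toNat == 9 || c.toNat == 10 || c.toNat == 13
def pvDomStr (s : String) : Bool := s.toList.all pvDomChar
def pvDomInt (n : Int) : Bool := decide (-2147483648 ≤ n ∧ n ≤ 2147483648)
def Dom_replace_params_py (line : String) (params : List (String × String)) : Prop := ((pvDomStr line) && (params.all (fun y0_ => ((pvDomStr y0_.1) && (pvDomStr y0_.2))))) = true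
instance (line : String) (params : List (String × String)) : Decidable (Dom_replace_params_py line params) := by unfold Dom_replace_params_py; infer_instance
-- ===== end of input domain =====

-- B replaces A's per-segment recursion that rescans every key by a single iterative fold over the
-- keys maintaining a flat literal/value token list (objective: alternative decomposition).

-- '{{ %s }}' % k
def pvMkKey (k : List Char) : List Char := '{'::'{'::' ':: (k ++ (' '::'}'::'}'::[]))

theorem pvMkKey_len (k : List Char) : (pvMkKey k).length = k.length + 6 := by
  simp [pvMkKey]

-- ===== PORT A =====
-- the 'for k, v in list(params.items())' loop up to its early 'return': the first (key, v) whose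
-- key occurs in line, or none
def pvScanKeys (line : List Char) (ps : List (String × String)) : Option (List Char × String) :=
  match ps with
  | [] => none
  | (k, v) :: rest =>
    let key := pvMkKey k.toList
    if PySem.Chars.find line key ≠ -1 then some (key, v) else pvScanKeys line rest

theorem pvScanKeys_some {line : List Char} {ps : List (String × String)} {key : List Char}
    {v : String} (h : pvScanKeys line ps = some (key, v)) :
    0 ≤ PySem.Chars.find line key ∧ 6 ≤ key.length := by
  induction ps with
  | nil => simp [pvScanKeys] at h
  | cons kv rest ih =>
    rw [pvScanKeys] at h
    by_cases hf : PySem.Chars.find line (pvMkKey kv.1.toList) ≠ -1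
    · rw [if_pos hf] at h
      obtain ⟨hk, hv⟩ := Prod.mk.injEq .. ▸ Option.some.injEq .. ▸ h
      subst hk
      refine ⟨?_, by simp [pvMkKey_len]⟩
      have := PySem.Chars.neg_one_le_find line (pvMkKey kv.1.toList)
      omega
    · rw [if_neg hf] at h
      exact ih h

theorem pvFind_fits {line key : List Char} (h : 0 ≤ PySem.Chars.find line key) :
    (PySem.Chars.find line key).toNat + key.length ≤ line.length := by
  have hp := (PySem.Chars.find_spec h).1
  have := hp.length_le
  have hle := PySem.Chars.find_le_length line key
  simp [List.length_drop] at this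
  omega

def replace_params_py_core (line : List Char) (ps : List (String × String)) : List String :=
  match h : pvScanKeys line ps with
  | none => [String.ofList line]
  | some (key, v) =>
    let pos := PySem.Chars.find line key
    replace_params_py_core (PySem.Chars.slice line none (some pos)) ps
      ++ [v]
      ++ replace_params_py_core (PySem.Chars.slice line (some (pos + key.length)) none) ps
termination_by line.length
decreasing_by
  · obtain ⟨h0, h6⟩ := pvScanKeys_some h
    have hfit := pvFind_fits h0
    rw [PySem.Chars.slice_eq_listSlice, PySem.List.slice_to _ h0]
    simp only [List.length_take]
    omega
  · obtain ⟨h0, h6⟩ := pvScanKeys_some h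
    have hfit := pvFind_fits h0
    rw [PySem.Chars.slice_eq_listSlice, PySem.List.slice_from _ (by omega)]
    simp only [List.length_drop]
    omega

def replace_params_py (line : String) (params : List (String × String)) : List String :=
  replace_params_py_core line.toList (PySem.Dict.ofList params).items

-- ===== PORT B =====
-- the inner 'while True' loop over one literal token: split off matches of key left to right
def pvSplitTok (k v : List Char) (text : List Char) (acc : List (Bool × List Char)) :
    List (Bool × List Char) :=
  if h : PySem.Chars.find text (pvMkKey k) = -1 then acc ++ [(true, text)]
  else
    pvSplitTok k v
      (PySem.Chars.slice text (some (PySem.Chars.find text (pvMkKey k) + (pvMkKey k).length)) none)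
      (acc ++ [(true, PySem.Chars.slice text none (some (PySem.Chars.find text (pvMkKey k)))), (false, v)])
termination_by text.length
decreasing_by
  have h0 : 0 ≤ PySem.Chars.find text (pvMkKey k) := by
    have := PySem.Chars.neg_one_le_find text (pvMkKey k)
    omega
  have hfit := pvFind_fits h0
  have h6 : 6 ≤ (pvMkKey k).length := by simp [pvMkKey_len]
  rw [PySem.Chars.slice_eq_listSlice, PySem.List.slice_from _ (by omega)]
  simp only [List.length_drop]
  omega

-- one iteration of 'for k, v in params.items()': rebuild the token list
def pvStepTok (kv : String × String) (toks : List (Bool × List Char)) : List (Bool × List Char) :=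
  toks.foldl (fun acc t => if t.1 then pvSplitTok kv.1.toList kv.2.toList t.2 acc else acc ++ [t]) []

def replace_params_py_alt_core (line : List Char) (ps : List (String × String)) : List String :=
  ((ps.foldl (fun toks kv => pvStepTok kv toks) [(true, line)]).map (fun t => String.ofList t.2))

def replace_params_py_alt (line : String) (params : List (String × String)) : List String :=
  replace_params_py_alt_core line.toList (PySem.Dict.ofList params).items

-- ===== PRECONDITION & SPEC =====
def Spec_replace_params_py (line : String) (params : List (String × String)) (out : List String) : Prop := out = replace_params_py_alt line params
instance (line : String) (params : List (String × String)) (out : List String) : Decidable (Spec_replace_params_py line params out) := by unfold Spec_replace_params_py; infer_instance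

-- ===== CLAIM (what is proved, stated in full; the proofs are below) =====
def Claim_equal_replace_params_py : Prop := ∀ (line : String) (params : List (String × String)), Dom_replace_params_py line params → Spec_replace_params_py line params (replace_params_py line params)

-- ===== LEMMAS AND PROOFS =====

-- shorthand for B's fold over the remaining params
def pvRun (ps : List (String × String)) (toks : List (Bool × List Char)) : List (Bool × List Char) :=
  ps.foldl (fun toks kv => pvStepTok kv toks) toks

def pvProj (t : Bool × List Char) : String := String.ofList t.2

theorem pvAltCore_eq (line : List Char) (ps : List (String × String)) :
    replace_params_py_alt_core line ps = (pvRun ps [(true, line)]).map pvProj := rfl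

-- unfolding equations for A's core
theorem pvCoreA_none {line : List Char} {ps : List (String × String)}
    (h : pvScanKeys line ps = none) :
    replace_params_py_core line ps = [String.ofList line] := by
  rw [replace_params_py_core]
  split <;> simp_all

theorem pvCoreA_some {line : List Char} {ps : List (String × String)} {key : List Char} {v : String}
    (h : pvScanKeys line ps = some (key, v)) :
    replace_params_py_core line ps =
      replace_params_py_core (PySem.Chars.slice line none (some (PySem.Chars.find line key))) ps
        ++ [v]
        ++ replace_params_py_core
             (PySem.Chars.slice line (some (PySem.Chars.find line key + key.length)) none) ps := by
  rw [replace_params_py_core]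
  split
  · simp_all
  · rename_i key' v' heq
    rw [h] at heq
    obtain ⟨hk, hv⟩ := Prod.mk.injEq .. ▸ Option.some.injEq .. ▸ heq
    subst hk hv
    rfl

theorem pvScanKeys_cons_pos {line : List Char} {k v : String} {ps : List (String × String)}
    (h : PySem.Chars.find line (pvMkKey k.toList) ≠ -1) :
    pvScanKeys line ((k, v) :: ps) = some (pvMkKey k.toList, v) := by
  rw [pvScanKeys]; simp [h]

theorem pvScanKeys_cons_neg {line : List Char} {k v : String} {ps : List (String × String)}
    (h : PySem.Chars.find line (pvMkKey k.toList) = -1) :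
    pvScanKeys line ((k, v) :: ps) = pvScanKeys line ps := by
  rw [pvScanKeys]; simp [h]

-- a key absent from line is absent from every contiguous piece of line
theorem pvFind_infix_neg {line t key : List Char} (h : PySem.Chars.find line key = -1)
    (ht : t <:+: line) : PySem.Chars.find t key = -1 := by
  rw [PySem.Chars.find_eq_neg_one_iff] at h ⊢
  exact fun hc => h (List.IsInfix.trans hc ht)

-- the part of line strictly before the first occurrence of key does not contain key
theorem pvFind_take_neg {line key : List Char} (h0 : 0 ≤ PySem.Chars.find line key)
    (hk : 0 < key.length) :
    PySem.Chars.find (line.take (PySem.Chars.find line key).toNat) key = -1 := by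
  rw [PySem.Chars.find_eq_neg_one_iff]
  intro hc
  obtain ⟨s, t, hst⟩ := hc
  have hpre : key <+: (line.take (PySem.Chars.find line key).toNat).drop s.length := by
    rw [← hst]
    simp
  have hlen : s.length + key.length + t.length
      = (line.take (PySem.Chars.find line key).toNat).length := by
    rw [← hst]; simp; omega
  have hlen' : s.length + key.length ≤ (PySem.Chars.find line key).toNat := by
    simp [List.length_take] at hlen
    omega
  have hpre2 : key <+: line.drop s.length := by
    refine hpre.trans ?_
    rw [List.drop_take]
    exact List.take_prefix _ _
  exact (PySem.Chars.find_spec h0).2 s.length (by omega) hpre2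

-- A ignores a key that does not occur in the line
theorem pvAbsent (k v : String) (ps : List (String × String)) :
    ∀ (line : List Char), PySem.Chars.find line (pvMkKey k.toList) = -1 →
      replace_params_py_core line ((k, v) :: ps) = replace_params_py_core line ps := by
  intro line
  generalize hL : line.length = n
  induction n using Nat.strong_induction_on generalizing line with
  | _ n IH =>
    intro hf
    cases hscan : pvScanKeys line ps with
    | none =>
      rw [pvCoreA_none hscan, pvCoreA_none (by rw [pvScanKeys_cons_neg hf]; exact hscan)]
    | some kv =>
      obtain ⟨key', v'⟩ := kv
      obtain ⟨h0, h6⟩ := pvScanKeys_some hscan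
      have hfit := pvFind_fits h0
      rw [pvCoreA_some hscan, pvCoreA_some (by rw [pvScanKeys_cons_neg hf]; exact hscan)]
      rw [PySem.Chars.slice_eq_listSlice, PySem.List.slice_to _ h0,
          PySem.Chars.slice_eq_listSlice, PySem.List.slice_from _ (by omega)]
      have hfl : PySem.Chars.find (line.take (PySem.Chars.find line key').toNat)
          (pvMkKey k.toList) = -1 :=
        pvFind_infix_neg hf (List.take_prefix _ _).isInfix
      have hfr : PySem.Chars.find (line.drop (PySem.Chars.find line key' + ↑key'.length).toNat)
          (pvMkKey k.toList) = -1 :=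
        pvFind_infix_neg hf (List.drop_suffix _ _).isInfix
      rw [IH _ (by subst hL; simp [List.length_take]; omega) _ rfl hfl,
          IH _ (by subst hL; simp [List.length_drop]; omega) _ rfl hfr]

-- B's inner while-loop threads its accumulator on the left
theorem pvSplitTok_acc (k v : List Char) :
    ∀ (text : List Char) (acc : List (Bool × List Char)),
      pvSplitTok k v text acc = acc ++ pvSplitTok k v text [] := by
  intro text
  generalize hL : text.length = n
  induction n using Nat.strong_induction_on generalizing text with
  | _ n IH =>
    intro acc
    by_cases hf : PySem.Chars.find text (pvMkKey k) = -1
    · conv_lhs => rw [pvSplitTok]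
      conv_rhs => rw [pvSplitTok]
      simp [hf]
    · have h0 : 0 ≤ PySem.Chars.find text (pvMkKey k) := by
        have := PySem.Chars.neg_one_le_find text (pvMkKey k)
        omega
      have hfit := pvFind_fits h0
      have h6 : 6 ≤ (pvMkKey k).length := by simp [pvMkKey_len]
      have hlt : (PySem.Chars.slice text
          (some (PySem.Chars.find text (pvMkKey k) + ↑(pvMkKey k).length)) none).length < n := by
        rw [PySem.Chars.slice_eq_listSlice, PySem.List.slice_from _ (by omega)]
        subst hL; simp [List.length_drop]; omega
      conv_lhs => rw [pvSplitTok]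
      conv_rhs => rw [pvSplitTok]
      simp only [hf, dif_neg, not_false_iff, List.nil_append]
      have hIH := IH _ hlt _ rfl
      rw [hIH (acc ++ [(true, PySem.Chars.slice text none (some (PySem.Chars.find text (pvMkKey k)))), (false, v)]),
          hIH [(true, PySem.Chars.slice text none (some (PySem.Chars.find text (pvMkKey k)))), (false, v)]]
      simp

-- one pass of B over a token list is a flatMap
theorem pvStepTok_eq_flatMap (kv : String × String) (toks : List (Bool × List Char)) :
    pvStepTok kv toks
      = toks.flatMap (fun t => if t.1 then pvSplitTok kv.1.toList kv.2.toList t.2 [] else [t]) := by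
  unfold pvStepTok
  rw [PySem.List.foldl_congr_mem _ _
        (fun acc t => acc ++ (if t.1 then pvSplitTok kv.1.toList kv.2.toList t.2 [] else [t])) _
        (by
          intro acc t _
          by_cases ht : t.1
          · simp only [ht, if_true]
            exact pvSplitTok_acc _ _ t.2 acc
          · simp [ht])]
  rw [PySem.List.foldl_append_eq_flatMap]
  rfl

theorem pvStepTok_append (kv : String × String) (t₁ t₂ : List (Bool × List Char)) :
    pvStepTok kv (t₁ ++ t₂) = pvStepTok kv t₁ ++ pvStepTok kv t₂ := by
  simp [pvStepTok_eq_flatMap]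

theorem pvRun_append (ps : List (String × String)) :
    ∀ (t₁ t₂ : List (Bool × List Char)), pvRun ps (t₁ ++ t₂) = pvRun ps t₁ ++ pvRun ps t₂ := by
  induction ps with
  | nil => intro t₁ t₂; rfl
  | cons kv ps ih =>
    intro t₁ t₂
    show pvRun ps (pvStepTok kv (t₁ ++ t₂)) = pvRun ps (pvStepTok kv t₁) ++ pvRun ps (pvStepTok kv t₂)
    rw [pvStepTok_append, ih]

theorem pvRun_false (ps : List (String × String)) (w : List Char) :
    pvRun ps [(false, w)] = [(false, w)] := by
  induction ps with
  | nil => rfl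
  | cons kv ps ih =>
    show pvRun ps (pvStepTok kv [(false, w)]) = [(false, w)]
    rw [pvStepTok_eq_flatMap]
    simpa using ih

-- the crux: one key processed by A's recursion vs by B's token pass, for any line
theorem pvConsCase (k v : String) (ps : List (String × String))
    (IH : ∀ l : List Char,
      replace_params_py_core l ps = (pvRun ps [(true, l)]).map pvProj) :
    ∀ (line : List Char),
      replace_params_py_core line ((k, v) :: ps)
        = (pvRun ps (pvSplitTok k.toList v.toList line [])).map pvProj := by
  intro line
  generalize hL : line.length = n
  induction n using Nat.strong_induction_on generalizing line with
  | _ n IH2 =>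
    by_cases hf : PySem.Chars.find line (pvMkKey k.toList) = -1
    · have hsplit : pvSplitTok k.toList v.toList line [] = [(true, line)] := by
        rw [pvSplitTok]; simp [hf]
      rw [hsplit, ← IH line, pvAbsent k v ps line hf]
    · have h0 : 0 ≤ PySem.Chars.find line (pvMkKey k.toList) := by
        have := PySem.Chars.neg_one_le_find line (pvMkKey k.toList)
        omega
      have hfit := pvFind_fits h0
      have h6 : 6 ≤ (pvMkKey k.toList).length := by simp [pvMkKey_len]
      have hsplit : pvSplitTok k.toList v.toList line []
          = [(true, PySem.Chars.slice line none (some (PySem.Chars.find line (pvMkKey k.toList)))),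
             (false, v.toList)]
            ++ pvSplitTok k.toList v.toList
                 (PySem.Chars.slice line
                   (some (PySem.Chars.find line (pvMkKey k.toList) + ↑(pvMkKey k.toList).length)) none)
                 [] := by
        rw [pvSplitTok]
        simp only [hf, dif_neg, not_false_iff]
        rw [pvSplitTok_acc]
        simp
      rw [hsplit]
      have hcons : ([(true, PySem.Chars.slice line none (some (PySem.Chars.find line (pvMkKey k.toList)))),
             (false, v.toList)] : List (Bool × List Char))
          = [(true, PySem.Chars.slice line none (some (PySem.Chars.find line (pvMkKey k.toList))))]
            ++ [(false, v.toList)] := rfl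
      rw [hcons, pvRun_append, pvRun_append, pvRun_false]
      rw [pvCoreA_some (pvScanKeys_cons_pos hf)]
      have hleft : replace_params_py_core
            (PySem.Chars.slice line none (some (PySem.Chars.find line (pvMkKey k.toList))))
            ((k, v) :: ps)
          = (pvRun ps [(true, PySem.Chars.slice line none
              (some (PySem.Chars.find line (pvMkKey k.toList))))]).map pvProj := by
        rw [pvAbsent k v ps _ (by
              rw [PySem.Chars.slice_eq_listSlice, PySem.List.slice_to _ h0]
              exact pvFind_take_neg h0 (by omega)),
            IH]
      have hright : replace_params_py_core
            (PySem.Chars.slice line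
              (some (PySem.Chars.find line (pvMkKey k.toList) + ↑(pvMkKey k.toList).length)) none)
            ((k, v) :: ps)
          = (pvRun ps (pvSplitTok k.toList v.toList
              (PySem.Chars.slice line
                (some (PySem.Chars.find line (pvMkKey k.toList) + ↑(pvMkKey k.toList).length)) none)
              [])).map pvProj := by
        refine IH2 ((PySem.Chars.slice line
            (some (PySem.Chars.find line (pvMkKey k.toList) + ↑(pvMkKey k.toList).length)) none).length)
          ?_ _ rfl
        rw [PySem.Chars.slice_eq_listSlice, PySem.List.slice_from _ (by omega)]
        subst hL; simp [List.length_drop]; omega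
      rw [hleft, hright]
      simp [pvProj]

-- A's core equals B's core on every parameter list and line
theorem pvMain (ps : List (String × String)) :
    ∀ (line : List Char),
      replace_params_py_core line ps = (pvRun ps [(true, line)]).map pvProj := by
  induction ps with
  | nil =>
    intro line
    rw [pvCoreA_none (by rfl)]
    rfl
  | cons kv ps ih =>
    intro line
    obtain ⟨k, v⟩ := kv
    have hstep : pvRun ((k, v) :: ps) [(true, line)]
        = pvRun ps (pvSplitTok k.toList v.toList line []) := rfl
    rw [hstep, pvConsCase k v ps ih line]

-- ===== VERDICT (by name: the statement is the Claim_ definition above) =====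
theorem replace_params_py_spec : Claim_equal_replace_params_py := by
  intro line params _
  show replace_params_py line params = replace_params_py_alt line params
  rw [replace_params_py, replace_params_py_alt, pvAltCore_eq, pvMain]
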